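-- pv_equiv track=rewrite | github.com/geometryxyz/msl-secp256k1 | py/utils.py | to_words_le
-- ===== SOURCE A (Python) =====
-- def to_words_le(val, num_words, word_size):
--     bitlength = len(bin(val)) - 2
--     assert bitlength <= num_words * word_size, "val is too large"
--     words = []
--
--     # max value per limb (exclusive)
--     max_limb_size = 2 ** word_size
--
--     v = val
--     while v > 0:
--         limb = v % max_limb_size
--         words.append(limb)
--         v = v // (max_limb_size)
--
--     while len(words) < num_words:
--         words.append(0)
--
--     return words
-- ===== SOURCE B (Python) =====
-- def to_words_le(val, num_words, word_size):
--     bitlength = len(bin(val)) - 2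
--     assert bitlength <= num_words * word_size, "val is too large"
--     if val <= 0:
--         return [0] * num_words
--     mask = (1 << word_size) - 1
--     return [(val >> (i * word_size)) & mask for i in range(num_words)]
-- ===== Notes on version B (the rewrite author's own statement) =====
-- stated objective: idiomatic
-- what changed: Each little-endian limb is extracted directly by shift-and-mask in one indexed comprehension over range(num_words) (with an explicit all-zero answer for nonpositive val), instead of A's sequential divide/mod reduction followed by a separate zero-padding loop.
import Mathlib
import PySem

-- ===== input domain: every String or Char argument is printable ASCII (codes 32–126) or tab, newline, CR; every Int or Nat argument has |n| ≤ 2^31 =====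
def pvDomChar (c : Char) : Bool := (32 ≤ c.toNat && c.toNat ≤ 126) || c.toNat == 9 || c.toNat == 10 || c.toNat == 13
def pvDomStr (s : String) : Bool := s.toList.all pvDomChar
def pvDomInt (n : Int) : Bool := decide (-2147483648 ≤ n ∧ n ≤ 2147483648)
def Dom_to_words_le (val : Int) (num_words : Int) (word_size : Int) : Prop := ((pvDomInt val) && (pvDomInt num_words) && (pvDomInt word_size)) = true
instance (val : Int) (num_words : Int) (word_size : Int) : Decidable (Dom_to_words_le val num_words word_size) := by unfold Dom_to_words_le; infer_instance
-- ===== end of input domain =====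

-- B extracts each little-endian limb directly by shift-and-mask over range(num_words)
-- (with an explicit all-zero result for nonpositive val), replacing A's sequential
-- divide/mod loop plus separate padding loop; objective: idiomatic, same cost.


-- ===== PORT A =====
-- `len(bin(val)) - 2`: binary digit count, the '-' sign counted for negatives, bin(0) = '0b0'
def pyBinLen (val : Int) : Int :=
  if val < 0 then (PySem.Int.bitLength val : Int) + 1
  else if val = 0 then 1
  else (PySem.Int.bitLength val : Int)

-- the `while v > 0: limb = v % max_limb_size; words.append(limb); v = v // max_limb_size` loop;
-- fuel is an upper bound on the iteration count (v strictly decreases when max_limb_size ≥ 2)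
def aLoop (m : Int) : Nat → Int → List Int
  | 0, _ => []
  | fuel+1, v =>
      if v > 0 then PySem.Int.mod v m :: aLoop m fuel (PySem.Int.floordiv v m) else []

-- the `while len(words) < num_words: words.append(0)` padding loop
def aPad (num_words : Int) (words : List Int) : List Int :=
  if h : (words.length : Int) < num_words then aPad num_words (words ++ [0]) else words
  termination_by (num_words - words.length).toNat
  decreasing_by simp; omega

def to_words_le (val : Int) (num_words : Int) (word_size : Int) : List Int :=
  -- `bitlength = len(bin(val)) - 2; assert bitlength <= num_words * word_size`:
  -- inputs failing the assert raise AssertionError and are excluded by Pre_to_words_le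
  let max_limb_size : Int := 2 ^ word_size.toNat   -- 2 ** word_size (word_size ≥ 1 whenever the loop runs, by Pre_)
  let words := aLoop max_limb_size (val.toNat + 1) val
  aPad num_words words

-- ===== PORT B =====
def to_words_le_alt (val : Int) (num_words : Int) (word_size : Int) : List Int :=
  -- same bitlength/assert first; failing inputs are excluded by Pre_to_words_le
  if val ≤ 0 then List.replicate num_words.toNat 0     -- [0] * num_words
  else
    -- mask = (1 << word_size) - 1; [(val >> (i * word_size)) & mask for i in range(num_words)]
    (PySem.List.pyRange 0 num_words 1).map
      (fun i => (((val.toNat >>> (i * word_size).toNat) &&& ((1 <<< word_size.toNat) - 1) : Nat) : Int))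

-- ===== PRECONDITION & SPEC =====
-- Pre_ excludes exactly the inputs where Python A does not return normally: assert failure
-- (bitlength > num_words*word_size, AssertionError), and val > 0 with word_size ≤ 0, where
-- 2**word_size is 1 (the division loop diverges) or a float (the limbs are floats, not ints).
def Pre_to_words_le (val : Int) (num_words : Int) (word_size : Int) : Prop :=
  pyBinLen val ≤ num_words * word_size ∧ (val ≤ 0 ∨ 1 ≤ word_size)
instance (val : Int) (num_words : Int) (word_size : Int) : Decidable (Pre_to_words_le val num_words word_size) := by unfold Pre_to_words_le; infer_instance

def pvWitness_to_words_le : Int × Int × Int := (5, 2, 3)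

def Spec_to_words_le (val : Int) (num_words : Int) (word_size : Int) (out : List Int) : Prop := out = to_words_le_alt val num_words word_size
instance (val : Int) (num_words : Int) (word_size : Int) (out : List Int) : Decidable (Spec_to_words_le val num_words word_size out) := by unfold Spec_to_words_le; infer_instance

-- ===== CLAIM (what is proved, stated in full; the proofs are below) =====
def Claim_equal_to_words_le : Prop := ∀ (val : Int) (num_words : Int) (word_size : Int), Dom_to_words_le val num_words word_size → Pre_to_words_le val num_words word_size → Spec_to_words_le val num_words word_size (to_words_le val num_words word_size)

-- ===== LEMMAS AND PROOFS =====

-- reference list of the k base-m limbs of v, little-endian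
def pvR (m : Int) : Nat → Int → List Int
  | 0, _ => []
  | k+1, v => v % m :: pvR m k (v / m)

lemma pvR_zero (m : Int) : ∀ k : Nat, pvR m k 0 = List.replicate k 0 := by
  intro k; induction k with
  | zero => rfl
  | succ k ih => simp [pvR, ih, List.replicate_succ]

lemma aPad_cons : ∀ (k : Nat) (n x : Int) (ys : List Int), (n - ((ys.length : Int) + 1)).toNat = k →
    aPad n (x :: ys) = x :: aPad (n - 1) ys := by
  intro k
  induction k with
  | zero =>
    intro n x ys hk
    have h1 : ¬ (((x :: ys).length : Int) < n) := by simp only [List.length_cons]; push_cast; omega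
    have h2 : ¬ ((ys.length : Int) < n - 1) := by omega
    rw [aPad, dif_neg h1, aPad, dif_neg h2]
  | succ k ih =>
    intro n x ys hk
    have h1 : (((x :: ys).length : Int) < n) := by simp only [List.length_cons]; push_cast; omega
    have h2 : ((ys.length : Int) < n - 1) := by omega
    conv_lhs => rw [aPad, dif_pos h1]
    conv_rhs => rw [aPad, dif_pos h2]
    have := ih n x (ys ++ [0]) (by simp only [List.length_append, List.length_cons, List.length_nil]; push_cast; omega)
    simpa using this

lemma aPad_nil : ∀ (k : Nat), aPad (k : Int) [] = List.replicate k 0 := by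
  intro k
  induction k with
  | zero => rw [aPad, dif_neg (by simp)]; rfl
  | succ k ih =>
    have hcast : ((k+1 : Nat) : Int) = (k : Int) + 1 := by push_cast; ring
    rw [hcast]
    conv_lhs => rw [aPad, dif_pos (by norm_num)]
    simp only [List.nil_append]
    have h := aPad_cons (((k:Int) + 1 - ((([] : List Int).length : Int) + 1)).toNat) ((k:Int)+1) 0 [] rfl
    rw [show ((k:Int) + 1) - 1 = (k:Int) by ring] at h
    rw [h, ih, List.replicate_succ]

lemma aPad_nonpos (n : Int) (hn : n ≤ 0) : aPad n [] = [] := by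
  rw [aPad, dif_neg (by simpa using by omega)]

lemma aLoop_pad (m : Int) (hm : 2 ≤ m) :
    ∀ (fuel : Nat) (v : Int) (k : Nat), 0 ≤ v → v.toNat < fuel → v < m ^ k →
      aPad (k : Int) (aLoop m fuel v) = pvR m k v := by
  intro fuel
  induction fuel with
  | zero => intro v k h0 hf _; omega
  | succ fuel ih =>
    intro v k h0 hf hb
    rw [aLoop]
    by_cases hv : v > 0
    · rw [if_pos hv]
      cases k with
      | zero => exfalso; simp at hb; omega
      | succ k =>
        have hfd : PySem.Int.floordiv v m = v / m :=
          PySem.Int.floordiv_eq_ediv_of_pos (by omega)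
        have hmd : PySem.Int.mod v m = v % m :=
          PySem.Int.mod_eq_emod_of_pos (by omega)
        have h1 : 0 ≤ v / m := Int.ediv_nonneg h0 (by omega)
        have hlt : v / m < v := by
          nlinarith [Int.ediv_mul_le v (show m ≠ 0 by omega)]
        have h2 : (v / m).toNat < fuel := by omega
        have h3 : v / m < m ^ k := by
          rw [Int.ediv_lt_iff_lt_mul (by omega : (0:Int) < m)]
          calc v < m ^ (k+1) := hb
            _ = m ^ k * m := by ring
        have hcons := aPad_cons ((((k:Nat)+1:Int) - (((aLoop m fuel (v/m)).length : Int) + 1)).toNat)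
          ((k:Nat)+1:Int) (v % m) (aLoop m fuel (v / m)) rfl
        rw [hfd, hmd]
        push_cast at hcons ⊢
        rw [hcons]
        have hk1 : ((k:Int) + 1) - 1 = (k : Int) := by ring
        rw [hk1, ih (v / m) k h1 h2 h3, pvR]
    · rw [if_neg hv]
      have hv0 : v = 0 := by omega
      subst hv0
      rw [aPad_nil, pvR_zero]

lemma alt_eq_pvR (w : Nat) : ∀ (k : Nat) (n : Nat),
    (List.range k).map (fun i => (((n >>> (i * w)) &&& ((1 <<< w) - 1) : Nat) : Int))
      = pvR ((2:Int)^w) k (n : Int) := by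
  intro k
  induction k with
  | zero => intro n; rfl
  | succ k ih =>
    intro n
    rw [List.range_succ_eq_map, List.map_cons, List.map_map]
    have hmask : (1 <<< w) - 1 = 2 ^ w - 1 := by rw [Nat.one_shiftLeft]
    have hhead : (((n >>> (0 * w)) &&& ((1 <<< w) - 1) : Nat) : Int) = (n : Int) % ((2:Int)^w) := by
      rw [hmask, Nat.zero_mul, Nat.shiftRight_zero, Nat.and_two_pow_sub_one_eq_mod]
      push_cast
      rfl
    have htail : ∀ i : Nat,
        ((n >>> ((i+1) * w)) &&& ((1 <<< w) - 1) : Nat) = ((n / 2 ^ w) >>> (i * w)) &&& ((1 <<< w) - 1) := by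
      intro i
      have : (i + 1) * w = w + i * w := by ring
      rw [this, Nat.shiftRight_add, Nat.shiftRight_eq_div_pow n w]
    have hdiv : ((n : Int)) / ((2:Int)^w) = ((n / 2 ^ w : Nat) : Int) := by push_cast; rfl
    rw [pvR, hdiv, ← ih (n / 2 ^ w), hhead]
    congr 1
    apply List.map_congr_left
    intro i _
    simp only [Function.comp, Nat.succ_eq_add_one]
    rw [htail i]

-- ===== VERDICT (by name: the statement is the Claim_ definition above) =====
theorem to_words_le_spec : Claim_equal_to_words_le := by
  intro val nw ws _ hpre
  obtain ⟨hassert, hcase⟩ := hpre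
  have hAdef : to_words_le val nw ws = aPad nw (aLoop ((2:Int) ^ ws.toNat) (val.toNat + 1) val) := rfl
  unfold Spec_to_words_le
  rw [hAdef]
  unfold to_words_le_alt
  by_cases hval : val ≤ 0
  · -- the division loop never runs; A pads zeros, B returns [0] * num_words
    rw [if_pos hval]
    have hloop : aLoop ((2:Int) ^ ws.toNat) (val.toNat + 1) val = [] := by
      have : val.toNat = 0 := by omega
      rw [this, aLoop, if_neg (by omega)]
    rw [hloop]
    by_cases hnw : nw ≤ 0
    · rw [aPad_nonpos nw hnw]
      have : nw.toNat = 0 := by omega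
      rw [this]; rfl
    · have : nw = ((nw.toNat : Nat) : Int) := by omega
      conv_lhs => rw [this, aPad_nil]
  · -- val > 0: word_size ≥ 1 and num_words ≥ 1
    rw [if_neg hval]
    have hv0 : 0 < val := by omega
    have hws : 1 ≤ ws := hcase.resolve_left (by omega)
    have hbl : 1 ≤ pyBinLen val := by
      unfold pyBinLen
      rw [if_neg (by omega), if_neg (by omega)]
      have := PySem.Int.lt_two_pow_bitLength val
      by_contra h
      have hz : PySem.Int.bitLength val = 0 := by omega
      rw [hz] at this
      simp at this
      omega
    have hnw : 1 ≤ nw := by nlinarith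
    set w : Nat := ws.toNat with hw
    set K : Nat := nw.toNat with hK
    have hwsw : ws = (w : Int) := by omega
    have hnwK : nw = (K : Int) := by omega
    have hm : 2 ≤ (2:Int) ^ w := by
      calc (2:Int) = 2 ^ 1 := by norm_num
        _ ≤ 2 ^ w := by apply pow_le_pow_right₀ (by norm_num); omega
    -- the assert bounds val below (2^w)^K
    have hbound : val < ((2:Int) ^ w) ^ K := by
      have hbl2 : (PySem.Int.bitLength val : Int) ≤ (K : Int) * (w : Int) := by
        have : pyBinLen val = (PySem.Int.bitLength val : Int) := by
          unfold pyBinLen; rw [if_neg (by omega), if_neg (by omega)]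
        rw [this] at hassert
        rw [hwsw, hnwK] at hassert
        exact hassert
      have hbln : PySem.Int.bitLength val ≤ K * w := by exact_mod_cast hbl2
      have h1 : val.natAbs < 2 ^ PySem.Int.bitLength val := PySem.Int.lt_two_pow_bitLength val
      have h2 : val.natAbs < 2 ^ (K * w) :=
        lt_of_lt_of_le h1 (Nat.pow_le_pow_right (by norm_num) hbln)
      have hv : val = ((val.natAbs : Nat) : Int) := by omega
      rw [hv]
      calc ((val.natAbs : Nat) : Int) < ((2 ^ (K * w) : Nat) : Int) := by exact_mod_cast h2
        _ = ((2:Int) ^ w) ^ K := by push_cast; rw [← pow_mul, Nat.mul_comm]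
    have hA := aLoop_pad ((2:Int) ^ w) hm (val.toNat + 1) val K (le_of_lt hv0)
      (by omega) hbound
    rw [hnwK, hA]
    -- B side: range(num_words) comprehension equals the same reference limbs
    rw [PySem.List.pyRange_one 0 (K : Int)]
    rw [List.map_map]
    have hlambda : ((fun i => (((val.toNat >>> (i * ws).toNat) &&& ((1 <<< w) - 1) : Nat) : Int))
          ∘ (fun k : Nat => (0:Int) + (k : Int)))
        = (fun i : Nat => (((val.toNat >>> (i * w)) &&& ((1 <<< w) - 1) : Nat) : Int)) := by
      funext i
      have hidx : ((0 + (i:Int)) * ws).toNat = i * w := by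
        rw [zero_add, hwsw, ← Nat.cast_mul, Int.toNat_natCast]
      simp only [Function.comp, hidx]
    have hrange : (((K : Nat) : Int) - 0).toNat = K := by omega
    rw [hrange, hlambda, alt_eq_pvR w K val.toNat]
    have : ((val.toNat : Nat) : Int) = val := by omega
    rw [this]
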